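-- pv_equiv track=rewrite | github.com/MrBrantCode/unitest_baseline | mut_generate/mist_train_taco/taco_16539/solution.py | can_form_queue
-- ===== SOURCE A (Python) =====
-- def can_form_queue(n, m, pairs):
--     from collections import defaultdict
--
--     def solve(v, a, visit, parent):
--         visit[v] = 1
--         for i in a[v]:
--             if visit[i] == 0:
--                 if solve(i, a, visit, v):
--                     return True
--             elif i != parent:
--                 return True
--         return False
--
--     visit = [0] * (n + 1)
--     a = defaultdict(list)
--
--     for x, y in pairs:
--         a[x].append(y)
--         a[y].append(x)
--
--     check = 0
--     for x in range(1, n + 1):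
--         if visit[x] == 0:
--             check = solve(x, a, visit, -1)
--         if len(a[x]) > 2:
--             check = 1
--         if check == 1:
--             break
--
--     return "NO" if check == 1 else "YES"
-- ===== SOURCE B (Python) =====
-- def can_form_queue(n, m, pairs):
--     # Iterative (explicit-stack) DFS over a visited set; degree counters built in
--     # the single edge pass and checked up front before any traversal.
--     deg = {}
--     adj = {}
--     for x, y in pairs:
--         deg[x] = deg.get(x, 0) + 1
--         deg[y] = deg.get(y, 0) + 1
--         adj.setdefault(x, []).append(y)
--         adj.setdefault(y, []).append(x)
--     if any(deg.get(x, 0) > 2 for x in range(1, n + 1)):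
--         return "NO"
--     visited = set()
--     for s in range(1, n + 1):
--         if s in visited:
--             continue
--         visited.add(s)
--         stack = [(s, -1, adj.get(s, []))]
--         while stack:
--             v, p, l = stack.pop()
--             if not l:
--                 continue
--             i, rest = l[0], l[1:]
--             stack.append((v, p, rest))
--             if i in visited:
--                 if i != p:
--                     return "NO"
--             else:
--                 visited.add(i)
--                 stack.append((i, v, adj.get(i, [])))
--     return "YES"
-- ===== Notes on version B (the rewrite author's own statement) =====
-- stated objective: alternative
-- what changed: Replaces the recursive DFS (defaultdict adjacency + 0/1 visit array, with the degree test interleaved into the vertex scan) by an explicit-stack iterative DFS over a visited set, with degrees counted in the single edge pass and checked up front before any traversal; the iterative DFS also avoids Python's recursion depth limit on deep components.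
-- outside the precondition, e.g. on can_form_queue(1, 1, [(1, 2)]): A raises IndexError, B returns 'YES'; on can_form_queue(2, 2, [(1, -1), (1, 2)]): A returns 'NO', B returns 'YES'
import Mathlib
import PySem

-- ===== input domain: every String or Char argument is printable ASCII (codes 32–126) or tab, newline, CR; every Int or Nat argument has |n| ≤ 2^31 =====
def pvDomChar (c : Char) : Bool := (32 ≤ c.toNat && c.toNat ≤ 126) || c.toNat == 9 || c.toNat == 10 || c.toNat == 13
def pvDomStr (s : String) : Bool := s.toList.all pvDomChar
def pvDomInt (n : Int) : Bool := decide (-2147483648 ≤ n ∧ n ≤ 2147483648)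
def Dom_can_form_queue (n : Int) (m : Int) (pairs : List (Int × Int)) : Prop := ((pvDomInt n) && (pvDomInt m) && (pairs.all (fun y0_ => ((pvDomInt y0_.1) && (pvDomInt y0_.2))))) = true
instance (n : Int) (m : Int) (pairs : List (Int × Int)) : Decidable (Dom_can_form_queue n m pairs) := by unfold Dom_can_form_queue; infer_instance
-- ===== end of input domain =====

-- B replaces A's recursive DFS (defaultdict adjacency + 0/1 visit array, degree test interleaved
-- into the vertex scan) by an explicit-stack iterative DFS over a visited set with the degree
-- counters checked up front; same O(n+m) cost, return values proved equal on Pre_.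


-- ===== PORT A =====
-- visit[i] read; exact for in-range i (out-of-range reads make Python raise and are outside Pre_)
def pyGetI (xs : List Int) (i : Int) : Int := (PySem.List.pyGet? xs i).getD 1

-- a[x].append(y); a[y].append(x)  (a = defaultdict(list))
def stepAdjA (d : PySem.Dict Int (List Int)) (xy : Int × Int) : PySem.Dict Int (List Int) :=
  let d1 := d.insert xy.1 (d.getD xy.1 [] ++ [xy.2])
  d1.insert xy.2 (d1.getD xy.2 [] ++ [xy.1])

def buildAdjA (pairs : List (Int × Int)) : PySem.Dict Int (List Int) :=
  pairs.foldl stepAdjA PySem.Dict.empty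

-- the 'for i in a[v]' loop of solve; rec is the recursive call 'solve(i, a, visit, v)'
def goAuxA (rec : Int → Int → List Int → Bool × List Int) (v parent : Int) :
    List Int → List Int → Bool × List Int
  | [], visit => (false, visit)
  | i :: rest, visit =>
    if pyGetI visit i == 0 then
      match rec i v visit with
      | (true, vis) => (true, vis)
      | (false, vis) => goAuxA rec v parent rest vis
    else if i ≠ parent then (true, visit)
    else goAuxA rec v parent rest visit

-- def solve(v, a, visit, parent); fuel only makes the recursion structural (never exhausted on Pre_)
def solveA (a : PySem.Dict Int (List Int)) : Nat → Int → Int → List Int → Bool × List Int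
  | 0, _, _, visit => (true, visit)
  | f + 1, v, parent, visit =>
    goAuxA (solveA a f) v parent (a.getD v []) (PySem.List.pySetD visit v 1)

-- for x in range(1, n+1): if visit[x]==0: check = solve(x,a,visit,-1); if len(a[x])>2: check=1; if check==1: break
def scanA (a : PySem.Dict Int (List Int)) (F : Nat) : List Int → List Int → Bool
  | [], _ => false
  | x :: xs, visit =>
    let r := if pyGetI visit x == 0 then solveA a F x (-1) visit else (false, visit)
    if r.1 || decide ((a.getD x []).length > 2) then true else scanA a F xs r.2

def can_form_queue (n : Int) (m : Int) (pairs : List (Int × Int)) : String :=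
  let a := buildAdjA pairs
  let visit := List.replicate (n + 1).toNat (0 : Int)
  if scanA a ((n + 1).toNat + 1) (PySem.List.pyRange 1 (n + 1) 1) visit then "NO" else "YES"

-- ===== PORT B =====
-- one edge pass: deg[x] = deg.get(x,0)+1; deg[y] = deg.get(y,0)+1; adj.setdefault(x,[]).append(y); same for y
def stepB (da : PySem.Dict Int Int × PySem.Dict Int (List Int)) (xy : Int × Int) :
    PySem.Dict Int Int × PySem.Dict Int (List Int) :=
  let d1 := da.1.insert xy.1 (da.1.getD xy.1 0 + 1)
  let d2 := d1.insert xy.2 (d1.getD xy.2 0 + 1)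
  let a1 := da.2.insert xy.1 (da.2.getD xy.1 [] ++ [xy.2])
  let a2 := a1.insert xy.2 (a1.getD xy.2 [] ++ [xy.1])
  (d2, a2)

def buildDegAdjB (pairs : List (Int × Int)) : PySem.Dict Int Int × PySem.Dict Int (List Int) :=
  pairs.foldl stepB (PySem.Dict.empty, PySem.Dict.empty)

-- the 'while stack:' loop; fuel only makes it structural (it is the loop's termination measure potB)
def loopB (adj : PySem.Dict Int (List Int)) :
    Nat → List (Int × Int × List Int) → PySem.Set Int → Bool × PySem.Set Int
  | _, [], vis => (false, vis)
  | 0, _, vis => (true, vis)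
  | g + 1, (v, p, l) :: st, vis =>
    match l with
    | [] => loopB adj g st vis
    | i :: rest =>
      if PySem.Set.contains vis i then
        if i ≠ p then (true, vis) else loopB adj g ((v, p, rest) :: st) vis
      else loopB adj g ((i, v, adj.getD i []) :: (v, p, rest) :: st) (PySem.Set.add vis i)

-- for s in range(1, n+1): if s in visited: continue; visited.add(s); stack = [(s,-1,adj.get(s,[]))]; while ...
def scanB (adj : PySem.Dict Int (List Int)) (G : Nat) : List Int → PySem.Set Int → Bool
  | [], _ => false
  | s :: ss, vis =>
    if PySem.Set.contains vis s then scanB adj G ss vis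
    else
      match loopB adj G [(s, -1, adj.getD s [])] (PySem.Set.add vis s) with
      | (true, _) => true
      | (false, vis') => scanB adj G ss vis'

-- fuel bound for loopB: the loop's standard termination measure (stack cost + unvisited potential)
def potB (adj : PySem.Dict Int (List Int)) (n : Int) (vis : PySem.Set Int) : Nat :=
  (((PySem.List.pyRange 1 (n + 1) 1).filter (fun w => !(PySem.Set.contains vis w))).map
    (fun w => (adj.getD w []).length + 1)).sum

-- extra fuel for vertices outside 1..n that the walk may still visit (they are dict keys)
def spareB (adj : PySem.Dict Int (List Int)) : Nat :=
  (adj.values.map (fun l => l.length + 1)).sum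

def can_form_queue_alt (n : Int) (m : Int) (pairs : List (Int × Int)) : String :=
  let da := buildDegAdjB pairs
  if (PySem.List.pyRange 1 (n + 1) 1).any (fun x => decide (da.1.getD x 0 > 2)) then "NO"
  else if scanB da.2 (potB da.2 n PySem.Set.empty + spareB da.2 + 1)
            (PySem.List.pyRange 1 (n + 1) 1) PySem.Set.empty then "NO"
  else "YES"

-- ===== PRECONDITION & SPEC =====
-- Pre_ excludes only the pairs that mix a vertex of 1..n with one outside that range: on those A
-- either raises IndexError (the DFS reads visit[i] out of range) or returns an accidental value
-- produced by Python's negative-index wraparound aliasing vertex i with vertex n+1+i in the visit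
-- array; edges lying entirely outside 1..n are never touched by A's scan and stay admitted.
def Pre_can_form_queue (n : Int) (m : Int) (pairs : List (Int × Int)) : Prop :=
  ∀ p ∈ pairs, (1 ≤ p.1 ∧ p.1 ≤ n ∧ 1 ≤ p.2 ∧ p.2 ≤ n) ∨
    (¬(1 ≤ p.1 ∧ p.1 ≤ n) ∧ ¬(1 ≤ p.2 ∧ p.2 ≤ n))
instance (n : Int) (m : Int) (pairs : List (Int × Int)) : Decidable (Pre_can_form_queue n m pairs) := by
  unfold Pre_can_form_queue; infer_instance

def pvWitness_can_form_queue : Int × Int × (List (Int × Int)) := (3, 2, [(1, 2), (2, 3)])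

def Spec_can_form_queue (n : Int) (m : Int) (pairs : List (Int × Int)) (out : String) : Prop := out = can_form_queue_alt n m pairs
instance (n : Int) (m : Int) (pairs : List (Int × Int)) (out : String) : Decidable (Spec_can_form_queue n m pairs out) := by unfold Spec_can_form_queue; infer_instance

-- ===== CLAIM (what is proved, stated in full; the proofs are below) =====
def Claim_equal_can_form_queue : Prop := ∀ (n : Int) (m : Int) (pairs : List (Int × Int)), Dom_can_form_queue n m pairs → Pre_can_form_queue n m pairs → Spec_can_form_queue n m pairs (can_form_queue n m pairs)

-- ===== LEMMAS AND PROOFS =====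

-- adjacency lists of the vertices 1..n only hold vertices of 1..n
def AdjOK (n : Int) (a : PySem.Dict Int (List Int)) : Prop :=
  ∀ k i, 1 ≤ k → k ≤ n → i ∈ a.getD k [] → 1 ≤ i ∧ i ≤ n

-- A's visit array and B's visited set describe the same vertices
def RelV (n : Int) (visit : List Int) (V : PySem.Set Int) : Prop :=
  visit.length = (n + 1).toNat ∧ (∀ w, w ∈ V → 1 ≤ w ∧ w ≤ n) ∧
  ∀ w : Int, 1 ≤ w → w ≤ n →
    PySem.List.pyGet? visit w = some (if w ∈ V then (1 : Int) else 0)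

def stackCost (st : List (Int × Int × List Int)) : Nat :=
  (st.map (fun e => e.2.2.length + 1)).sum

def Ucnt (n : Int) (V : PySem.Set Int) : Nat :=
  ((PySem.List.pyRange 1 (n + 1) 1).filter (fun w => !(PySem.Set.contains V w))).length

lemma contains_eq_decide (s : PySem.Set Int) (x : Int) :
    PySem.Set.contains s x = decide (x ∈ s) := by
  cases hc : PySem.Set.contains s x <;> simp_all

lemma sum_filter_drop (c : Int → Nat) (q : Int → Bool) :
    ∀ (L : List Int), L.Nodup → ∀ i, i ∈ L → q i = true →
      ((L.filter (fun w => q w && !(w == i))).map c).sum + c i = ((L.filter q).map c).sum := by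
  intro L
  induction L with
  | nil => intro _ i hi; cases hi
  | cons t L ih =>
    intro hnd i hiL hqi
    rcases List.nodup_cons.mp hnd with ⟨htL, hnd'⟩
    by_cases hit : i = t
    · subst hit
      have hcong : L.filter (fun w => q w && !(w == i)) = L.filter q :=
        List.filter_congr (fun w hw => by
          have hwt : w ≠ i := fun e => htL (e ▸ hw)
          simp [hwt])
      rw [List.filter_cons, List.filter_cons]
      rw [if_neg (by simp [hqi]), if_pos hqi, hcong]
      simp
      omega
    · have h : i ∈ L := by
        rcases List.mem_cons.mp hiL with h | h
        · exact absurd h hit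
        · exact h
      have ihh := ih hnd' i h hqi
      have hti : (t == i) = false := by
        simp only [beq_eq_false_iff_ne, ne_eq]
        exact fun e => hit e.symm
      rw [List.filter_cons, List.filter_cons]
      by_cases hqt : q t = true
      · rw [if_pos (by simp [hqt, hti]), if_pos hqt]
        simp only [List.map_cons, List.sum_cons]
        omega
      · have hqt' : q t = false := by
          cases hq2 : q t
          · rfl
          · exact absurd hq2 hqt
        rw [if_neg (by simp [hqt']), if_neg (by simp [hqt'])]
        exact ihh

lemma sum_filter_add (c : Int → Nat) (L : List Int) (hnd : L.Nodup) (V : PySem.Set Int)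
    (i : Int) (hiL : i ∈ L) (hiV : i ∉ V) :
    ((L.filter (fun w => !(PySem.Set.contains (PySem.Set.add V i) w))).map c).sum + c i =
    ((L.filter (fun w => !(PySem.Set.contains V w))).map c).sum := by
  have hq : (fun w => !(PySem.Set.contains (PySem.Set.add V i) w)) =
      (fun w => (!(PySem.Set.contains V w)) && !(w == i)) := by
    funext w
    by_cases h1 : w ∈ V <;> by_cases h2 : w = i <;>
      simp [contains_eq_decide, PySem.Set.mem_add, h1, h2]
  rw [hq]
  exact sum_filter_drop c (fun w => !(PySem.Set.contains V w)) L hnd i hiL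
    (by simp [contains_eq_decide, hiV])

lemma pot_add (a : PySem.Dict Int (List Int)) (n : Int) (V : PySem.Set Int) (i : Int)
    (h1 : 1 ≤ i) (h2 : i ≤ n) (hiV : i ∉ V) :
    potB a n (PySem.Set.add V i) + ((a.getD i []).length + 1) = potB a n V := by
  exact sum_filter_add (fun w => (a.getD w []).length + 1) _
    (PySem.List.nodup_pyRange_one 1 (n + 1)) V i
    (PySem.List.mem_pyRange_one.mpr ⟨h1, by omega⟩) hiV

lemma sum_map_one (l : List Int) : (l.map (fun _ => (1 : Nat))).sum = l.length := by
  induction l with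
  | nil => rfl
  | cons a l ih => simp [ih]; omega

lemma Ucnt_add (n : Int) (V : PySem.Set Int) (i : Int)
    (h1 : 1 ≤ i) (h2 : i ≤ n) (hiV : i ∉ V) :
    Ucnt n (PySem.Set.add V i) + 1 = Ucnt n V := by
  have := sum_filter_add (fun _ => (1 : Nat)) (PySem.List.pyRange 1 (n + 1) 1)
    (PySem.List.nodup_pyRange_one 1 (n + 1)) V i
    (PySem.List.mem_pyRange_one.mpr ⟨h1, by omega⟩) hiV
  unfold Ucnt
  rw [← sum_map_one, ← sum_map_one (List.filter _ _)]
  exact this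

lemma Ucnt_le (n : Int) (V : PySem.Set Int) : Ucnt n V ≤ n.toNat := by
  have h := List.length_filter_le (fun w => !(PySem.Set.contains V w))
    (PySem.List.pyRange 1 (n + 1) 1)
  have h2 : (PySem.List.pyRange 1 (n + 1) 1).length = n.toNat := by
    rw [PySem.List.length_pyRange_one]; congr 1; omega
  unfold Ucnt; omega

lemma pos_of_unvisited (n : Int) (V : PySem.Set Int) (i : Int)
    (h1 : 1 ≤ i) (h2 : i ≤ n) (hiV : i ∉ V) : 1 ≤ Ucnt n V := by
  have : i ∈ (PySem.List.pyRange 1 (n + 1) 1).filter (fun w => !(PySem.Set.contains V w)) := by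
    refine List.mem_filter.mpr ⟨PySem.List.mem_pyRange_one.mpr ⟨h1, by omega⟩, ?_⟩
    simp [contains_eq_decide, hiV]
  have := List.length_pos_of_mem this
  unfold Ucnt; omega

lemma pyGet?_in (xs : List Int) (w : Int) (h0 : 0 ≤ w) :
    PySem.List.pyGet? xs w = xs[w.toNat]? := by
  obtain ⟨k, rfl⟩ : ∃ k : Nat, w = (k : Int) := ⟨w.toNat, (Int.toNat_of_nonneg h0).symm⟩
  simp [PySem.List.pyGet?, PySem.List.pyIdx?]
  split_ifs with hlt
  · simp
  · symm
    first
      | exact List.getElem?_eq_none (by omega)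
      | exact List.getElem?_eq_none_iff.mpr (by omega)
      | simp [List.getElem?_eq_none_iff]; omega

lemma RelV_add (n : Int) (visit : List Int) (V : PySem.Set Int) (x : Int)
    (h : RelV n visit V) (h1 : 1 ≤ x) (h2 : x ≤ n) :
    RelV n (PySem.List.pySetD visit x 1) (PySem.Set.add V x) := by
  obtain ⟨hlen, hbnd, hval⟩ := h
  have hx0 : (0 : Int) ≤ x := by omega
  have hxlen : x.toNat < visit.length := by rw [hlen]; omega
  refine ⟨by rw [PySem.List.length_pySetD]; exact hlen, ?_, ?_⟩
  · intro w hw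
    rcases (PySem.Set.mem_add V x w).mp hw with hw | hw
    · exact hbnd w hw
    · subst hw; exact ⟨h1, h2⟩
  · intro w hw1 hw2
    rw [PySem.List.pySetD_of_nonneg visit 1 hx0]
    rw [pyGet?_in _ _ (by omega)]
    by_cases hwx : w = x
    · subst hwx
      rw [List.getElem?_set_self]
      · simp [PySem.Set.mem_add, hxlen]
      · omega
    · have hne : x.toNat ≠ w.toNat := by omega
      rw [List.getElem?_set_ne hne]
      rw [← pyGet?_in _ _ (by omega), hval w hw1 hw2]
      simp [PySem.Set.mem_add, hwx]

theorem SIM (n : Int) (a : PySem.Dict Int (List Int)) (hA : AdjOK n a)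
    (f : Nat) (l : List Int) (v p : Int) (st : List (Int × Int × List Int))
    (visit : List Int) (V : PySem.Set Int) (g : Nat)
    (hR : RelV n visit V) (hl : ∀ i ∈ l, 1 ≤ i ∧ i ≤ n)
    (hf : Ucnt n V ≤ f) (hg : l.length + 1 + stackCost st + potB a n V ≤ g) :
    (∀ vis, goAuxA (solveA a f) v p l visit = (true, vis) →
      (loopB a g ((v, p, l) :: st) V).1 = true) ∧
    (∀ vis', goAuxA (solveA a f) v p l visit = (false, vis') →
      ∃ g' V', loopB a g ((v, p, l) :: st) V = loopB a g' st V' ∧ RelV n vis' V' ∧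
        (∀ w, w ∈ V → w ∈ V') ∧ Ucnt n V' ≤ Ucnt n V ∧
        stackCost st + potB a n V' ≤ g' ∧ g' ≤ g) := by
  revert hR hl hf hg
  induction f using Nat.strong_induction_on generalizing l v p st visit V g with
  | _ f IHf =>
  induction l generalizing v p st visit V g with
  | nil =>
    intro hR hl hf hg
    obtain ⟨g1, rfl⟩ : ∃ g1, g = g1 + 1 := ⟨g - 1, by omega⟩
    constructor
    · intro vis h; simp [goAuxA] at h
    · intro vis' h
      simp only [goAuxA, Prod.mk.injEq] at h
      refine ⟨g1, V, by simp [loopB], ?_, fun w hw => hw, le_refl _, ?_, by omega⟩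
      · rw [← h.2]; exact hR
      · simp [stackCost] at hg ⊢; omega
  | cons i rest IHl =>
    intro hR hl hf hg
    obtain ⟨g1, rfl⟩ : ∃ g1, g = g1 + 1 := ⟨g - 1, by omega⟩
    have hi := hl i (List.mem_cons_self ..)
    have hrest : ∀ j ∈ rest, 1 ≤ j ∧ j ≤ n := fun j hj => hl j (List.mem_cons_of_mem _ hj)
    have hval := hR.2.2
    have hread : pyGetI visit i = if i ∈ V then 1 else 0 := by
      simp [pyGetI, hval i hi.1 hi.2]
    have hlen1 : (i :: rest).length = rest.length + 1 := by simp
    by_cases hiV : i ∈ V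
    · have hA0 : ¬((pyGetI visit i == 0) = true) := by simp [hread, hiV]
      have hBc : PySem.Set.contains V i = true := by simp [contains_eq_decide, hiV]
      by_cases hip : i = p
      · -- skipped neighbour (the parent): both continue
        subst hip
        have IH := IHl v i st visit V g1 hR hrest hf (by omega)
        have hAstep : goAuxA (solveA a f) v i (i :: rest) visit =
            goAuxA (solveA a f) v i rest visit := by
          simp only [goAuxA]
          rw [if_neg hA0, if_neg (by simp)]
        have hBstep : loopB a (g1 + 1) ((v, i, i :: rest) :: st) V =
            loopB a g1 ((v, i, rest) :: st) V := by
          simp only [loopB]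
          rw [if_pos hBc, if_neg (by simp)]
        constructor
        · intro vis h; rw [hAstep] at h; rw [hBstep]; exact IH.1 vis h
        · intro vis' h; rw [hAstep] at h
          obtain ⟨g', V', e, hR', hsub, hU, hb, hle⟩ := IH.2 vis' h
          exact ⟨g', V', by rw [hBstep, e], hR', hsub, hU, hb, by omega⟩
      · -- cycle detected: both report true
        constructor
        · intro vis h
          simp only [loopB]
          rw [if_pos hBc, if_pos hip]
        · intro vis' h
          have : goAuxA (solveA a f) v p (i :: rest) visit = (true, visit) := by
            simp only [goAuxA]
            rw [if_neg hA0, if_pos hip]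
          rw [this] at h
          simp at h
    · -- unvisited neighbour: recurse / push
      have hA0 : (pyGetI visit i == 0) = true := by simp [hread, hiV]
      have hBc : ¬(PySem.Set.contains V i = true) := by simp [contains_eq_decide, hiV]
      obtain ⟨f0, rfl⟩ : ∃ f0, f = f0 + 1 :=
        ⟨f - 1, by have := pos_of_unvisited n V i hi.1 hi.2 hiV; omega⟩
      have hpot := pot_add a n V i hi.1 hi.2 hiV
      have hUadd := Ucnt_add n V i hi.1 hi.2 hiV
      have hRadd := RelV_add n visit V i hR hi.1 hi.2
      have hsc2 : stackCost ((v, p, rest) :: st) = rest.length + 1 + stackCost st := by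
        simp [stackCost]
        try omega
      have hchild := IHf f0 (by omega) (a.getD i []) i v ((v, p, rest) :: st)
        (PySem.List.pySetD visit i 1) (PySem.Set.add V i) g1
        hRadd (fun j hj => hA i j hi.1 hi.2 hj) (by omega)
        (by rw [hsc2]; omega)
      have hBstep : loopB a (g1 + 1) ((v, p, i :: rest) :: st) V =
          loopB a g1 ((i, v, a.getD i []) :: (v, p, rest) :: st) (PySem.Set.add V i) := by
        simp only [loopB]
        rw [if_neg hBc]
      have hsolve : solveA a (f0 + 1) i v visit =
          goAuxA (solveA a f0) i v (a.getD i []) (PySem.List.pySetD visit i 1) := rfl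
      rcases hres : goAuxA (solveA a f0) i v (a.getD i []) (PySem.List.pySetD visit i 1)
        with ⟨b, vis1⟩
      cases b with
      | true =>
        have hAstep : goAuxA (solveA a (f0 + 1)) v p (i :: rest) visit = (true, vis1) := by
          simp only [goAuxA]
          rw [if_pos hA0, hsolve, hres]
        constructor
        · intro vis h; rw [hBstep]; exact hchild.1 vis1 hres
        · intro vis' h; rw [hAstep] at h; simp at h
      | false =>
        obtain ⟨g', V', e1, hR1, hsub1, hU1, hb1, hle1⟩ := hchild.2 vis1 hres
        have hAstep : goAuxA (solveA a (f0 + 1)) v p (i :: rest) visit =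
            goAuxA (solveA a (f0 + 1)) v p rest vis1 := by
          simp only [goAuxA]
          rw [if_pos hA0, hsolve, hres]
        have hb1' : rest.length + 1 + stackCost st + potB a n V' ≤ g' := by
          rw [hsc2] at hb1; omega
        have hrest' := IHl v p st vis1 V' g' hR1 hrest (by omega) (by omega)
        constructor
        · intro vis h
          rw [hAstep] at h
          rw [hBstep, e1]
          exact hrest'.1 vis h
        · intro vis' h
          rw [hAstep] at h
          obtain ⟨g2, V2, e2, hR2, hsub2, hU2, hb2, hle2⟩ := hrest'.2 vis' h
          refine ⟨g2, V2, by rw [hBstep, e1, e2], hR2, ?_, by omega, hb2, by omega⟩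
          intro w hw
          exact hsub2 w (hsub1 w ((PySem.Set.mem_add V i w).mpr (Or.inl hw)))

theorem SCAN (n : Int) (a : PySem.Dict Int (List Int)) (hA : AdjOK n a) (F G : Nat)
    (hF : n.toNat < F) (xs : List Int) (visit : List Int) (V : PySem.Set Int)
    (hR : RelV n visit V) (hxs : ∀ x ∈ xs, 1 ≤ x ∧ x ≤ n) (hG : potB a n V ≤ G) :
    scanA a F xs visit =
      (xs.any (fun x => decide ((a.getD x []).length > 2)) || scanB a G xs V) := by
  induction xs generalizing visit V with
  | nil => simp [scanA, scanB]
  | cons x xs ih =>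
    have hx := hxs x (List.mem_cons_self ..)
    have hxs' : ∀ y ∈ xs, 1 ≤ y ∧ y ≤ n := fun y hy => hxs y (List.mem_cons_of_mem _ hy)
    have hread : pyGetI visit x = if x ∈ V then 1 else 0 := by
      simp [pyGetI, hR.2.2 x hx.1 hx.2]
    by_cases hxV : x ∈ V
    · have hA0 : ¬((pyGetI visit x == 0) = true) := by simp [hread, hxV]
      have hBc : PySem.Set.contains V x = true := by simp [contains_eq_decide, hxV]
      have hBs : scanB a G (x :: xs) V = scanB a G xs V := by
        simp only [scanB]
        rw [if_pos hBc]
      have hAr : scanA a F (x :: xs) visit =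
          (if decide ((a.getD x []).length > 2) then true else scanA a F xs visit) := by
        simp only [scanA]
        rw [if_neg hA0]
        simp
      rw [hBs, hAr, ih visit V hR hxs' hG]
      by_cases hdx : (a.getD x []).length > 2
      · simp [hdx]
      · simp [hdx]
    · have hA0 : (pyGetI visit x == 0) = true := by simp [hread, hxV]
      have hBc : ¬(PySem.Set.contains V x = true) := by simp [contains_eq_decide, hxV]
      obtain ⟨F0, rfl⟩ : ∃ F0, F = F0 + 1 := ⟨F - 1, by omega⟩
      have hpot := pot_add a n V x hx.1 hx.2 hxV
      have hUadd := Ucnt_add n V x hx.1 hx.2 hxV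
      have hRadd := RelV_add n visit V x hR hx.1 hx.2
      have hUle := Ucnt_le n V
      have hsim := SIM n a hA F0 (a.getD x []) x (-1) []
        (PySem.List.pySetD visit x 1) (PySem.Set.add V x) G
        hRadd (fun j hj => hA x j hx.1 hx.2 hj) (by omega)
        (by
          have hsc0 : stackCost [] = 0 := rfl
          omega)
      have hsolve : solveA a (F0 + 1) x (-1) visit =
          goAuxA (solveA a F0) x (-1) (a.getD x []) (PySem.List.pySetD visit x 1) := rfl
      rcases hres : goAuxA (solveA a F0) x (-1) (a.getD x []) (PySem.List.pySetD visit x 1)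
        with ⟨b, vis1⟩
      cases b with
      | true =>
        have hb := hsim.1 vis1 hres
        have hBs : scanB a G (x :: xs) V = true := by
          simp only [scanB]
          rw [if_neg hBc]
          rcases hlp : loopB a G [(x, -1, a.getD x [])] (PySem.Set.add V x) with ⟨bb, VV⟩
          rw [hlp] at hb
          simp at hb
          subst hb
          rfl
        have hAr : scanA a (F0 + 1) (x :: xs) visit = true := by
          simp only [scanA]
          rw [if_pos hA0, hsolve, hres]
          simp
        rw [hAr, hBs]
        simp
      | false =>
        obtain ⟨g', V', e1, hR1, hsub1, hU1, hb1, hle1⟩ := hsim.2 vis1 hres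
        have hend : loopB a G [(x, -1, a.getD x [])] (PySem.Set.add V x) = (false, V') := by
          rw [e1]
          cases g' <;> rfl
        have hBs : scanB a G (x :: xs) V = scanB a G xs V' := by
          simp only [scanB]
          rw [if_neg hBc, hend]
        have hG' : potB a n V' ≤ G := by
          have hsc0 : stackCost [] = 0 := rfl
          omega
        by_cases hdx : (a.getD x []).length > 2
        · have hAr : scanA a (F0 + 1) (x :: xs) visit = true := by
            simp only [scanA]
            rw [if_pos hA0, hsolve, hres]
            simp [hdx]
          rw [hAr, hBs]
          simp [hdx]
        · have hAr : scanA a (F0 + 1) (x :: xs) visit = scanA a (F0 + 1) xs vis1 := by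
            simp only [scanA]
            rw [if_pos hA0, hsolve, hres]
            simp [hdx]
          rw [hAr, hBs, ih vis1 V' hR1 hxs' hG']
          simp [hdx]

lemma foldl_stepB_snd (l : List (Int × Int)) (da : PySem.Dict Int Int × PySem.Dict Int (List Int)) :
    (l.foldl stepB da).2 = l.foldl stepAdjA da.2 := by
  induction l generalizing da with
  | nil => rfl
  | cons xy l ih => rw [List.foldl_cons, List.foldl_cons, ih]; rfl

lemma adjB_eq_adjA (pairs : List (Int × Int)) : (buildDegAdjB pairs).2 = buildAdjA pairs := by
  unfold buildDegAdjB buildAdjA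
  exact foldl_stepB_snd pairs _

lemma foldl_deg_len (l : List (Int × Int)) (da : PySem.Dict Int Int × PySem.Dict Int (List Int))
    (h : ∀ k, da.1.getD k 0 = ((da.2.getD k [] : List Int).length : Int)) :
    ∀ k, (l.foldl stepB da).1.getD k 0 =
      (((l.foldl stepB da).2.getD k [] : List Int).length : Int) := by
  induction l generalizing da with
  | nil => exact h
  | cons xy l ih =>
    rw [List.foldl_cons]
    apply ih
    intro k
    simp only [stepB, PySem.Dict.getD_insert]
    split_ifs with e1 e2 <;> simp [h k, h xy.1, h xy.2] <;> push_cast <;> omega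

lemma degB_eq_len (pairs : List (Int × Int)) (k : Int) :
    (buildDegAdjB pairs).1.getD k 0 = (((buildAdjA pairs).getD k [] : List Int).length : Int) := by
  rw [← adjB_eq_adjA]
  exact foldl_deg_len pairs (PySem.Dict.empty, PySem.Dict.empty) (by intro k; simp) k

lemma foldl_adj_ok (n : Int) (l : List (Int × Int)) (ad : PySem.Dict Int (List Int))
    (h : ∀ k i, 1 ≤ k → k ≤ n → i ∈ ad.getD k [] → 1 ≤ i ∧ i ≤ n)
    (hl : ∀ xy ∈ l, (1 ≤ xy.1 ∧ xy.1 ≤ n ∧ 1 ≤ xy.2 ∧ xy.2 ≤ n) ∨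
      (¬(1 ≤ xy.1 ∧ xy.1 ≤ n) ∧ ¬(1 ≤ xy.2 ∧ xy.2 ≤ n))) :
    ∀ k i, 1 ≤ k → k ≤ n → i ∈ (l.foldl stepAdjA ad).getD k [] → 1 ≤ i ∧ i ≤ n := by
  induction l generalizing ad with
  | nil => exact h
  | cons xy l ih =>
    rw [List.foldl_cons]
    apply ih
    · intro k i hk1 hk2 hi
      rcases hl xy (List.mem_cons_self ..) with hin | hout
      · simp only [stepAdjA, PySem.Dict.getD_insert] at hi
        split_ifs at hi with e1 e2 e3
        · rcases List.mem_append.mp hi with hm | hm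
          · rcases List.mem_append.mp hm with hm2 | hm2
            · exact h xy.1 i hin.1 hin.2.1 hm2
            · rw [List.mem_singleton.mp hm2]; exact ⟨hin.2.2.1, hin.2.2.2⟩
          · rw [List.mem_singleton.mp hm]; exact ⟨hin.1, hin.2.1⟩
        · rcases List.mem_append.mp hi with hm | hm
          · exact h xy.2 i hin.2.2.1 hin.2.2.2 hm
          · rw [List.mem_singleton.mp hm]; exact ⟨hin.1, hin.2.1⟩
        · rcases List.mem_append.mp hi with hm | hm
          · exact h xy.1 i hin.1 hin.2.1 hm
          · rw [List.mem_singleton.mp hm]; exact ⟨hin.2.2.1, hin.2.2.2⟩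
        · exact h k i hk1 hk2 hi
      · simp only [stepAdjA, PySem.Dict.getD_insert] at hi
        rw [if_neg (fun e => hout.2 (by rw [← e]; exact ⟨hk1, hk2⟩)),
          if_neg (fun e => hout.1 (by rw [← e]; exact ⟨hk1, hk2⟩))] at hi
        exact h k i hk1 hk2 hi
    · exact fun z hz => hl z (List.mem_cons_of_mem _ hz)

lemma adjA_OK (n : Int) (pairs : List (Int × Int))
    (hP : ∀ p ∈ pairs, (1 ≤ p.1 ∧ p.1 ≤ n ∧ 1 ≤ p.2 ∧ p.2 ≤ n) ∨
      (¬(1 ≤ p.1 ∧ p.1 ≤ n) ∧ ¬(1 ≤ p.2 ∧ p.2 ≤ n))) :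
    AdjOK n (buildAdjA pairs) := by
  unfold buildAdjA AdjOK
  apply foldl_adj_ok
  · intro k i _ _ hi; simp at hi
  · exact hP

-- ===== VERDICT (by name: the statement is the Claim_ definition above) =====
theorem can_form_queue_spec : Claim_equal_can_form_queue := by
  intro n m pairs hD hP
  unfold Spec_can_form_queue
  have hAok := adjA_OK n pairs hP
  have hR0 : RelV n (List.replicate (n + 1).toNat (0 : Int)) PySem.Set.empty := by
    refine ⟨by simp, by intro w hw; simp [PySem.Set.empty] at hw, ?_⟩
    intro w hw1 hw2
    rw [pyGet?_in _ _ (by omega)]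
    rw [List.getElem?_replicate]
    have : w.toNat < (n + 1).toNat := by omega
    simp [this, PySem.Set.empty]
  have hxs : ∀ x ∈ PySem.List.pyRange 1 (n + 1) 1, 1 ≤ x ∧ x ≤ n := by
    intro x hx
    have := PySem.List.mem_pyRange_one.mp hx
    omega
  have hscan := SCAN n (buildAdjA pairs) hAok ((n + 1).toNat + 1)
    (potB (buildAdjA pairs) n PySem.Set.empty + spareB (buildAdjA pairs) + 1) (by omega)
    (PySem.List.pyRange 1 (n + 1) 1) (List.replicate (n + 1).toNat (0 : Int))
    PySem.Set.empty hR0 hxs (by omega)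
  have hdeg : (PySem.List.pyRange 1 (n + 1) 1).any
        (fun x => decide ((buildDegAdjB pairs).1.getD x 0 > 2)) =
      (PySem.List.pyRange 1 (n + 1) 1).any
        (fun x => decide (((buildAdjA pairs).getD x [] : List Int).length > 2)) := by
    refine List.any_congr rfl fun x => ?_
    rw [degB_eq_len, decide_eq_decide]
    omega
  have hbool : ∀ (b c : Bool), (if (b || c) then "NO" else "YES") =
      (if b then "NO" else if c then "NO" else "YES") := by decide
  simp only [can_form_queue, can_form_queue_alt]
  rw [adjB_eq_adjA, hdeg, hscan]
  exact hbool _ _
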